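-- pv_equiv track=rewrite | github.com/MichalisPanayides/AmbulanceDecisionGame | src/ambulance_game/markov/markov.py | build_states
-- ===== SOURCE A (Python) =====
-- def build_states(threshold, system_capacity, parking_capacity):
--     """Builds the set of states in a list format by combine two sets of states where:
--         - states_1 consists of all states before reaching the threshold
--             (0, 0), (0, 1), ..., (0, T-1) where T is the threshold
--         - states_2 consists of all states after reaching the threshold including
--         the threshold (where S is the system capacity)
--             (0, T), (0, T+1), ..., (0, S)
--             (1, T), (1, T+1), ..., (1, S)
--               .         .            .
--               .         .            .
--               .         .            .
--             (P, T), (P, T+1), ..., (P, S)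
--
--     Note that if the threshold is greater than the system_capacity then the Markov
--     chain will be of the form:
--          (0, 0), (0, 1), ..., (0, S)
--     Parameters
--     ----------
--     threshold : int
--         Distinguishes between the two sets of states to be combined. In general,
--         if the number of individuals in the hospital >= threshold ambulance patients
--         are not allowed.
--     system_capacity : int
--         The maximum capacity of the hospital (i.e. number of servers + queue size)
--     parking_capacity : int
--         The number of parking spaces
--
--     Returns
--     -------
--     list
--         a list of all the states
--
--     TODO: turn into a generator
--     """
--     if parking_capacity < 1:
--         raise ValueError(
--             "Simulation only implemented for parking_capacity >= 1"
--         )  # TODO Add an option to ciw model to all for no parking capacity.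
--
--     if threshold > system_capacity:
--         return [(0, v) for v in range(0, system_capacity + 1)]
--         # states_1 = [(0, v) for v in range(0, system_capacity + 1)]
--         # states_2 = [(1, system_capacity)]
--         # return states_1 + states_2
--
--     states_1 = [(0, v) for v in range(0, threshold)]
--     states_2 = [
--         (u, v)
--         for v in range(threshold, system_capacity + 1)
--         for u in range(parking_capacity + 1)
--     ]
--     all_states = states_1 + states_2
--
--     return all_states
-- ===== SOURCE B (Python) =====
-- def build_states(threshold, system_capacity, parking_capacity):
--     if parking_capacity < 1:
--         raise ValueError(
--             "Simulation only implemented for parking_capacity >= 1"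
--         )
--     width = parking_capacity + 1
--     cut = min(threshold, system_capacity + 1)
--     head = max(cut, 0)
--     total = head + (system_capacity + 1 - cut) * width
--     states = []
--     for i in range(total):
--         if i < head:
--             states.append((0, i))
--         else:
--             q, u = divmod(i - head, width)
--             states.append((u, cut + q))
--     return states
-- ===== Notes on version B (the rewrite author's own statement) =====
-- stated objective: alternative
-- what changed: Replaces A's early-return special case and two nested comprehensions by a closed-form index-to-state map: the total number of states is computed up front and each rank i is decoded with divmod into its (parking, hospital) state.
import Mathlib
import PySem

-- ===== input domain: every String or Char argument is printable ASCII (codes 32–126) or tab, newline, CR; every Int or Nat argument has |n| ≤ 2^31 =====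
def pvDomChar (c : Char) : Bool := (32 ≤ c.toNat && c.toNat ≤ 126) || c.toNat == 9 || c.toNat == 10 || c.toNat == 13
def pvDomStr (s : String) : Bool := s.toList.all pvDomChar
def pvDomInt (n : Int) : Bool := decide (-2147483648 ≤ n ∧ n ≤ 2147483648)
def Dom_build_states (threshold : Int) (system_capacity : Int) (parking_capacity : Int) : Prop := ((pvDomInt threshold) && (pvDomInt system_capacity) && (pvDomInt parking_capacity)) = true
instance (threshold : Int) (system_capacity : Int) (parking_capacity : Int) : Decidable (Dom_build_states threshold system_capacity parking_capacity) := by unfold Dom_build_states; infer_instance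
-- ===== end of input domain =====

-- B enumerates the states by a closed-form index→state map (divmod rank arithmetic) instead of
-- A's special case plus two nested comprehensions (alternative decomposition; same cost).

-- ===== PORT A =====
def build_states (threshold : Int) (system_capacity : Int) (parking_capacity : Int) : List (Int × Int) :=
  -- the 'parking_capacity < 1' ValueError is excluded by Pre_build_states
  if threshold > system_capacity then
    (PySem.List.pyRange 0 (system_capacity + 1) 1).map (fun v => ((0 : Int), v))
  else
    ((PySem.List.pyRange 0 threshold 1).map (fun v => ((0 : Int), v))) ++
      ((PySem.List.pyRange threshold (system_capacity + 1) 1).flatMap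
        (fun v => (PySem.List.pyRange 0 (parking_capacity + 1) 1).map (fun u => (u, v))))

-- ===== PORT B =====
def build_states_alt (threshold : Int) (system_capacity : Int) (parking_capacity : Int) : List (Int × Int) :=
  -- the 'parking_capacity < 1' ValueError is excluded by Pre_build_states
  let width := parking_capacity + 1
  let cut := min threshold (system_capacity + 1)
  let head := max cut 0
  let total := head + (system_capacity + 1 - cut) * width
  (PySem.List.pyRange 0 total 1).foldl
    (fun acc i =>
      if i < head then acc ++ [((0 : Int), i)]
      else acc ++ [(PySem.Int.mod (i - head) width, cut + PySem.Int.floordiv (i - head) width)])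
    []

-- ===== PRECONDITION & SPEC =====
-- Pre_ excludes exactly parking_capacity < 1, where the Python A raises ValueError.
def Pre_build_states (_threshold : Int) (_system_capacity : Int) (parking_capacity : Int) : Prop :=
  1 ≤ parking_capacity
instance (threshold : Int) (system_capacity : Int) (parking_capacity : Int) : Decidable (Pre_build_states threshold system_capacity parking_capacity) := by unfold Pre_build_states; infer_instance

def pvWitness_build_states : Int × Int × Int := (2, 4, 2)

def Spec_build_states (threshold : Int) (system_capacity : Int) (parking_capacity : Int) (out : List (Int × Int)) : Prop := out = build_states_alt threshold system_capacity parking_capacity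
instance (threshold : Int) (system_capacity : Int) (parking_capacity : Int) (out : List (Int × Int)) : Decidable (Spec_build_states threshold system_capacity parking_capacity out) := by unfold Spec_build_states; infer_instance

-- ===== CLAIM (what is proved, stated in full; the proofs are below) =====
def Claim_equal_build_states : Prop := ∀ (threshold : Int) (system_capacity : Int) (parking_capacity : Int), Dom_build_states threshold system_capacity parking_capacity → Pre_build_states threshold system_capacity parking_capacity → Spec_build_states threshold system_capacity parking_capacity (build_states threshold system_capacity parking_capacity)

-- ===== LEMMAS AND PROOFS =====

theorem pv_flatMap_singleton {α β : Type} (l : List α) (f : α → β) :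
    l.flatMap (fun x => [f x]) = l.map f := by
  induction l with
  | nil => rfl
  | cons a l ih => simp [List.flatMap_cons, ih]

theorem pv_map_congr_mem {α β : Type} {l : List α} {f g : α → β}
    (h : ∀ x ∈ l, f x = g x) : l.map f = l.map g := List.map_congr_left h

-- B's foldl is a map over the index range
theorem pv_alt_eq_map (threshold system_capacity parking_capacity : Int) :
    build_states_alt threshold system_capacity parking_capacity =
      (PySem.List.pyRange 0
          (max (min threshold (system_capacity + 1)) 0 +
            (system_capacity + 1 - min threshold (system_capacity + 1)) * (parking_capacity + 1)) 1).map
        (fun i =>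
          if i < max (min threshold (system_capacity + 1)) 0 then ((0 : Int), i)
          else (PySem.Int.mod (i - max (min threshold (system_capacity + 1)) 0) (parking_capacity + 1),
                min threshold (system_capacity + 1) +
                  PySem.Int.floordiv (i - max (min threshold (system_capacity + 1)) 0) (parking_capacity + 1))) := by
  unfold build_states_alt
  simp only []
  have hbody : (fun (acc : List (Int × Int)) i =>
      if i < max (min threshold (system_capacity + 1)) 0 then acc ++ [((0 : Int), i)]
      else acc ++ [(PySem.Int.mod (i - max (min threshold (system_capacity + 1)) 0) (parking_capacity + 1),
                min threshold (system_capacity + 1) +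
                  PySem.Int.floordiv (i - max (min threshold (system_capacity + 1)) 0) (parking_capacity + 1))])
      = (fun acc i => acc ++
          [if i < max (min threshold (system_capacity + 1)) 0 then ((0 : Int), i)
           else (PySem.Int.mod (i - max (min threshold (system_capacity + 1)) 0) (parking_capacity + 1),
                min threshold (system_capacity + 1) +
                  PySem.Int.floordiv (i - max (min threshold (system_capacity + 1)) 0) (parking_capacity + 1))]) := by
    funext acc i
    by_cases h : i < max (min threshold (system_capacity + 1)) 0 <;> simp [h]
  rw [hbody, PySem.List.foldl_append_eq_flatMap]
  simp only [List.nil_append]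
  exact pv_flatMap_singleton _ _

-- mod and floordiv shift by one full period
theorem pv_mod_shift (x w : Int) (hw : 0 < w) :
    PySem.Int.mod (x + w) w = PySem.Int.mod x w := by
  rw [PySem.Int.mod_eq_emod_of_pos hw, PySem.Int.mod_eq_emod_of_pos hw,
    show x + w = x + w * 1 by ring, Int.add_mul_emod_self_left]

theorem pv_fdiv_shift (x w : Int) (hw : 0 < w) :
    PySem.Int.floordiv (x + w) w = PySem.Int.floordiv x w + 1 := by
  rw [PySem.Int.floordiv_eq_ediv_of_pos hw, PySem.Int.floordiv_eq_ediv_of_pos hw,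
    show x + w = x + 1 * w by ring, Int.add_mul_ediv_right _ _ (by omega : w ≠ 0)]

-- shifting a unit range
theorem pv_range_shift (a w : Int) (f : Int → Int × Int) :
    (PySem.List.pyRange a (a + w) 1).map f
      = (PySem.List.pyRange 0 w 1).map (fun u => f (a + u)) := by
  rw [PySem.List.pyRange_one a (a + w), PySem.List.pyRange_one 0 w]
  simp [List.map_map, Function.comp]

-- rank arithmetic unrolls to the column-by-column enumeration
theorem pv_cols (w cut a : Int) (hw : 0 < w) (n : Nat) :
    (PySem.List.pyRange a (a + (n : Int) * w) 1).map
        (fun i => (PySem.Int.mod (i - a) w, cut + PySem.Int.floordiv (i - a) w))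
      = (PySem.List.pyRange cut (cut + (n : Int)) 1).flatMap
          (fun v => (PySem.List.pyRange 0 w 1).map (fun u => (u, v))) := by
  induction n generalizing cut a with
  | zero => simp [PySem.List.pyRange_one_eq_nil]
  | succ n ih =>
      push_cast
      rw [PySem.List.pyRange_one_append a (a + w) (a + ((n : Int) + 1) * w) (by omega)
        (by nlinarith [Int.natCast_nonneg n]), List.map_append]
      rw [show (cut + ((n : Int) + 1)) = (cut + 1) + (n : Int) by ring,
        PySem.List.pyRange_one_cons (by omega : cut < cut + 1 + (n : Int)), List.flatMap_cons]
      congr 1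
      · -- first column
        rw [pv_range_shift a w]
        apply pv_map_congr_mem
        intro u hu
        rw [PySem.List.mem_pyRange_one] at hu
        have h1 : a + u - a = u := by ring
        rw [h1, PySem.Int.mod_eq_emod_of_pos hw, PySem.Int.floordiv_eq_ediv_of_pos hw,
          Int.emod_eq_of_lt hu.1 hu.2, Int.ediv_eq_zero_of_lt hu.1 hu.2]
        simp
      · -- remaining columns via the induction hypothesis at offset a + w
        have hsplit : a + ((n : Int) + 1) * w = (a + w) + (n : Int) * w := by ring
        rw [hsplit]
        rw [pv_map_congr_mem (g := fun i =>
            (PySem.Int.mod (i - (a + w)) w, (cut + 1) + PySem.Int.floordiv (i - (a + w)) w))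
          (by
            intro i hi
            have h2 : i - a = (i - (a + w)) + w := by ring
            rw [h2, pv_mod_shift _ _ hw, pv_fdiv_shift _ _ hw]
            ring_nf)]
        exact ih (cut + 1) (a + w)

-- ===== VERDICT (by name: the statement is the Claim_ definition above) =====
theorem build_states_spec : Claim_equal_build_states := by
  intro t s p _ hp
  unfold Spec_build_states
  rw [pv_alt_eq_map]
  unfold build_states
  have hw : (0 : Int) < p + 1 := by unfold Pre_build_states at hp; omega
  by_cases hts : t > s
  · -- A's early return: cut = s + 1, no tail columns
    rw [if_pos hts]
    have hcut : min t (s + 1) = s + 1 := by omega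
    rw [hcut]
    have htot : max (s + 1) 0 + (s + 1 - (s + 1)) * (p + 1) = max (s + 1) 0 := by ring_nf
    rw [htot]
    have hrng : PySem.List.pyRange 0 (max (s + 1) 0) 1 = PySem.List.pyRange 0 (s + 1) 1 := by
      by_cases h : 0 ≤ s + 1
      · rw [max_eq_left h]
      · rw [PySem.List.pyRange_one_eq_nil (by omega), PySem.List.pyRange_one_eq_nil (by omega)]
    rw [hrng]
    apply (pv_map_congr_mem ?_).symm
    intro i hi
    rw [PySem.List.mem_pyRange_one] at hi
    rw [if_pos (by omega)]
  · -- cut = t: split B's index range at head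
    rw [if_neg hts]
    have hcut : min t (s + 1) = t := by omega
    rw [hcut]
    set head := max t 0 with hhead
    have hn : (s + 1 - t) = (((s + 1 - t).toNat : Nat) : Int) := by omega
    rw [PySem.List.pyRange_one_append 0 head (head + (s + 1 - t) * (p + 1)) (by omega)
      (by nlinarith [mul_nonneg (by omega : (0:Int) ≤ s + 1 - t) (by omega : (0:Int) ≤ p + 1)]),
      List.map_append]
    congr 1
    · -- the head states (0, i)
      have hr : PySem.List.pyRange 0 head 1 = PySem.List.pyRange 0 t 1 := by
        by_cases h : 0 ≤ t
        · rw [hhead, max_eq_left h]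
        · rw [PySem.List.pyRange_one_eq_nil (by omega), PySem.List.pyRange_one_eq_nil (by omega)]
      rw [hr]
      symm
      apply pv_map_congr_mem
      intro i hi
      rw [PySem.List.mem_pyRange_one] at hi
      rw [if_pos (by omega : i < head)]
    · -- the tail columns via rank arithmetic
      rw [pv_map_congr_mem (g := fun i =>
          (PySem.Int.mod (i - head) (p + 1), t + PySem.Int.floordiv (i - head) (p + 1)))
        (by
          intro i hi
          rw [PySem.List.mem_pyRange_one] at hi
          rw [if_neg (by omega)])]
      rw [hn, pv_cols (p + 1) t head hw, ← hn,
        show t + (s + 1 - t) = s + 1 by ring]
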